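-- pv_equiv track=rewrite | github.com/joviva/viloria-checkers-ai | docs/model/encoder.py | encode_move
-- ===== SOURCE A (Python) =====
-- def encode_move(from_row: int, from_col: int, to_row: int, to_col: int, board_size: int = 10):
--     """
--     Encode a move into a single index for the policy network output.
--     """
--     # Get playable squares
--     playable_squares = []
--     for row in range(board_size):
--         for col in range(board_size):
--             if (row + col) % 2 == 1:
--                 playable_squares.append((row, col))
--
--     # Find from_square index
--     try:
--         from_square_idx = playable_squares.index((from_row, from_col))
--     except ValueError:
--         return -1
--
--     # Calculate direction
--     dr = to_row - from_row
--     dc = to_col - from_col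
--
--     # Map direction to index
--     directions = [
--         (-1, -1), (-1, 1), (1, -1), (1, 1),
--         (-2, -2), (-2, 2), (2, -2), (2, 2)
--     ]
--
--     try:
--         direction_idx = directions.index((dr, dc))
--     except ValueError:
--         # For longer king moves, normalize to single step
--         normalized_dr = dr // abs(dr) if dr != 0 else 0
--         normalized_dc = dc // abs(dc) if dc != 0 else 0
--         try:
--             direction_idx = directions.index((normalized_dr, normalized_dc))
--         except ValueError:
--             return -1
--
--     return from_square_idx * 8 + direction_idx
-- ===== SOURCE B (Python) =====
-- def encode_move(from_row: int, from_col: int, to_row: int, to_col: int, board_size: int = 10):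
--     """Closed-form encoding: arithmetic on row/col instead of building and scanning lists."""
--     if not (0 <= from_row < board_size and 0 <= from_col < board_size
--             and (from_row + from_col) % 2 == 1):
--         return -1
--     from_square_idx = (from_row * board_size) // 2 + from_col // 2
--     dr = to_row - from_row
--     dc = to_col - from_col
--     if dr == 0 or dc == 0:
--         return -1
--     direction_idx = (2 if dr > 0 else 0) + (1 if dc > 0 else 0)
--     if abs(dr) == 2 and abs(dc) == 2:
--         direction_idx += 4
--     return from_square_idx * 8 + direction_idx
-- ===== Notes on version B (the rewrite author's own statement) =====
-- stated objective: faster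
-- what changed: B replaces A's construction and linear .index scan of the O(board_size^2) playable-square list by a closed-form floor-division formula for the square index, and the two direction-list .index lookups by sign/absolute-value arithmetic.
import Mathlib
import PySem

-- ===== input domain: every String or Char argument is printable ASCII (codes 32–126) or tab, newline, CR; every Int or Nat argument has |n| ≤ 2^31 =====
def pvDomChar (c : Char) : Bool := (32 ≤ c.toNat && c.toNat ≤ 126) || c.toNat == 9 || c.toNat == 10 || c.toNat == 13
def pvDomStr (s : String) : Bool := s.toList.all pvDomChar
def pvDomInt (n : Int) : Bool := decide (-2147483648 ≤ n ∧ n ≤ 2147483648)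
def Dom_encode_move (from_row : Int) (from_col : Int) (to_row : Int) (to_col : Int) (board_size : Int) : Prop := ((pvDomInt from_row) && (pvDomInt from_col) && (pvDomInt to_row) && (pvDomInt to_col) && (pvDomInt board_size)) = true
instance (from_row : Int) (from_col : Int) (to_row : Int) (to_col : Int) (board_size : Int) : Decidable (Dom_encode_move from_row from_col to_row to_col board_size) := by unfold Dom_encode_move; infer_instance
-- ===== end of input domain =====

-- B replaces A's O(board_size^2) build-and-scan of the playable-square list by a closed-form
-- parity/floor-division formula (O(1)); return values are identical on all inputs.

-- ===== PORT A =====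
-- literal transliteration of A: build the playable-square list with two nested loops,
-- look the from-square up with list.index, then look the (normalized) direction up.
def encode_move (from_row : Int) (from_col : Int) (to_row : Int) (to_col : Int) (board_size : Int) : Int :=
  let playable := (PySem.List.pyRange 0 board_size 1).foldl (fun acc row =>
    (PySem.List.pyRange 0 board_size 1).foldl (fun acc2 col =>
      if PySem.Int.mod (row + col) 2 == 1 then acc2 ++ [(row, col)] else acc2) acc) []
  match PySem.List.index? playable (from_row, from_col) with
  | none => -1                                   -- except ValueError: return -1
  | some from_square_idx =>
    let dr := to_row - from_row
    let dc := to_col - from_col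
    let directions : List (Int × Int) :=
      [(-1,-1), (-1,1), (1,-1), (1,1), (-2,-2), (-2,2), (2,-2), (2,2)]
    match PySem.List.index? directions (dr, dc) with
    | some direction_idx => (from_square_idx : Int) * 8 + (direction_idx : Int)
    | none =>
      let normalized_dr := if dr ≠ 0 then PySem.Int.floordiv dr |dr| else 0
      let normalized_dc := if dc ≠ 0 then PySem.Int.floordiv dc |dc| else 0
      match PySem.List.index? directions (normalized_dr, normalized_dc) with
      | some direction_idx => (from_square_idx : Int) * 8 + (direction_idx : Int)
      | none => -1

-- ===== PORT B =====
-- closed form: no list is built; the square index and direction index are arithmetic.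
def encode_move_alt (from_row : Int) (from_col : Int) (to_row : Int) (to_col : Int) (board_size : Int) : Int :=
  if 0 ≤ from_row ∧ from_row < board_size ∧ 0 ≤ from_col ∧ from_col < board_size ∧
      PySem.Int.mod (from_row + from_col) 2 = 1 then
    let from_square_idx := PySem.Int.floordiv (from_row * board_size) 2 + PySem.Int.floordiv from_col 2
    let dr := to_row - from_row
    let dc := to_col - from_col
    if dr = 0 ∨ dc = 0 then -1
    else
      let direction_idx := (if 0 < dr then 2 else 0) + (if 0 < dc then 1 else 0)
      let direction_idx := if |dr| = 2 ∧ |dc| = 2 then direction_idx + 4 else direction_idx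
      from_square_idx * 8 + direction_idx
  else -1

-- ===== PRECONDITION & SPEC =====
def Spec_encode_move (from_row : Int) (from_col : Int) (to_row : Int) (to_col : Int) (board_size : Int) (out : Int) : Prop := out = encode_move_alt from_row from_col to_row to_col board_size
instance (from_row : Int) (from_col : Int) (to_row : Int) (to_col : Int) (board_size : Int) (out : Int) : Decidable (Spec_encode_move from_row from_col to_row to_col board_size out) := by unfold Spec_encode_move; infer_instance

-- ===== CLAIM (what is proved, stated in full; the proofs are below) =====
def Claim_equal_encode_move : Prop := ∀ (from_row : Int) (from_col : Int) (to_row : Int) (to_col : Int) (board_size : Int), Dom_encode_move from_row from_col to_row to_col board_size → Spec_encode_move from_row from_col to_row to_col board_size (encode_move from_row from_col to_row to_col board_size)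

-- ===== LEMMAS AND PROOFS =====

theorem pv_index?_append_of_not_mem {α : Type} [BEq α] [LawfulBEq α] {l : List α} (t : List α)
    {v : α} (h : v ∉ l) :
    PySem.List.index? (l ++ t) v = (PySem.List.index? t v).map (· + l.length) := by
  induction l with
  | nil => simp [PySem.List.index?_eq_idxOf?]
  | cons x xs ih =>
    simp only [List.mem_cons, not_or] at h
    simp only [List.cons_append]
    rw [PySem.List.index?_cons_of_ne _ (fun e => h.1 e.symm), ih h.2]
    cases PySem.List.index? t v
    · simp
    · simp; omega

theorem pv_index?_map {α β : Type} [BEq α] [LawfulBEq α] [BEq β] [LawfulBEq β]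
    {f : α → β} (hf : Function.Injective f) (l : List α) (v : α) :
    PySem.List.index? (l.map f) (f v) = PySem.List.index? l v := by
  induction l with
  | nil => rfl
  | cons x xs ih =>
    by_cases hx : x = v
    · subst hx
      rw [List.map_cons, PySem.List.index?_cons_self, PySem.List.index?_cons_self]
    · rw [List.map_cons, PySem.List.index?_cons_of_ne _ (fun e => hx (hf e)),
        PySem.List.index?_cons_of_ne _ hx, ih]

theorem pv_col_index? (r bs fc : Int) : ∀ b : Int, 0 ≤ b →
    Option.map (fun n : Nat => (n : Int))
      (PySem.List.index? ((PySem.List.pyRange b bs 1).filter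
        (fun c => PySem.Int.mod (r + c) 2 == 1)) fc)
    = if b ≤ fc ∧ fc < bs ∧ PySem.Int.mod (r + fc) 2 = 1 then
        some (PySem.Int.floordiv fc 2 -
              PySem.Int.floordiv (b + 1 - PySem.Int.mod (r + 1) 2) 2)
      else none := by
  have hmod : ∀ x : Int, PySem.Int.mod x 2 = x % 2 := fun x =>
    PySem.Int.mod_eq_emod_of_pos (by norm_num)
  have hfd : ∀ x : Int, PySem.Int.floordiv x 2 = x / 2 := fun x =>
    PySem.Int.floordiv_eq_ediv_of_pos (by norm_num)
  have H : ∀ (n : Nat) (b : Int), 0 ≤ b → (bs - b).toNat = n →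
      Option.map (fun n : Nat => (n : Int))
        (PySem.List.index? ((PySem.List.pyRange b bs 1).filter
          (fun c => PySem.Int.mod (r + c) 2 == 1)) fc)
      = if b ≤ fc ∧ fc < bs ∧ PySem.Int.mod (r + fc) 2 = 1 then
          some (PySem.Int.floordiv fc 2 -
                PySem.Int.floordiv (b + 1 - PySem.Int.mod (r + 1) 2) 2)
        else none := by
    intro n
    induction n with
    | zero =>
      intro b hb hn
      have hbs : bs ≤ b := by omega
      rw [PySem.List.pyRange_one_eq_nil hbs]
      rw [if_neg (by omega)]
      simp [PySem.List.index?_eq_idxOf?]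
    | succ n ih =>
      intro b hb hn
      have hblt : b < bs := by omega
      rw [PySem.List.pyRange_one_cons hblt, List.filter_cons]
      by_cases hq : PySem.Int.mod (r + b) 2 = 1
      · rw [if_pos (by simpa using hq)]
        by_cases hfb : fc = b
        · subst hfb
          rw [PySem.List.index?_cons_self]
          rw [if_pos ⟨le_refl _, hblt, hq⟩]
          simp only [Option.map_some]
          rw [hmod] at hq
          simp only [hfd, hmod]
          congr 1; push_cast; omega
        · rw [PySem.List.index?_cons_of_ne _ (fun e => hfb e.symm)]
          rw [Option.map_map]
          have ih' := ih (b + 1) (by omega) (by omega)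
          have : Option.map ((fun n : Nat => (n : Int)) ∘ (fun x => x + 1))
              (PySem.List.index? ((PySem.List.pyRange (b+1) bs 1).filter
                (fun c => PySem.Int.mod (r + c) 2 == 1)) fc)
            = Option.map (fun z : Int => z + 1)
              (Option.map (fun n : Nat => (n : Int))
                (PySem.List.index? ((PySem.List.pyRange (b+1) bs 1).filter
                  (fun c => PySem.Int.mod (r + c) 2 == 1)) fc)) := by
            rw [Option.map_map]; rfl
          rw [this, ih']
          rw [hmod] at hq
          by_cases hc : b + 1 ≤ fc ∧ fc < bs ∧ PySem.Int.mod (r + fc) 2 = 1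
          · rw [if_pos hc, if_pos ⟨by omega, hc.2⟩]
            simp only [Option.map_some, hfd, hmod]
            have := hc.2.2; rw [hmod] at this
            congr 1
            omega
          · rw [if_neg hc, if_neg (by
              intro ⟨h1, h2, h3⟩; exact hc ⟨by omega, h2, h3⟩)]
            rfl
      · rw [if_neg (by simpa using hq)]
        have ih' := ih (b + 1) (by omega) (by omega)
        rw [ih']
        rw [hmod] at hq
        have hq0 : (r + b) % 2 = 0 := by omega
        by_cases hc : b + 1 ≤ fc ∧ fc < bs ∧ PySem.Int.mod (r + fc) 2 = 1
        · rw [if_pos hc, if_pos ⟨by omega, hc.2⟩]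
          simp only [hfd, hmod]
          congr 1; omega
        · rw [if_neg hc, if_neg (by
            intro ⟨h1, h2, h3⟩
            apply hc
            refine ⟨?_, h2, h3⟩
            rcases eq_or_lt_of_le h1 with he | hl
            · exfalso; rw [hmod] at h3; omega
            · omega)]
  exact fun b hb => H (bs - b).toNat b hb rfl

theorem pv_col_length (r bs : Int) : ∀ b : Int, 0 ≤ b → b ≤ bs →
    (((PySem.List.pyRange b bs 1).filter
        (fun c => PySem.Int.mod (r + c) 2 == 1)).length : Int)
    = PySem.Int.floordiv (bs + 1 - PySem.Int.mod (r + 1) 2) 2 -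
      PySem.Int.floordiv (b + 1 - PySem.Int.mod (r + 1) 2) 2 := by
  have hmod : ∀ x : Int, PySem.Int.mod x 2 = x % 2 := fun x =>
    PySem.Int.mod_eq_emod_of_pos (by norm_num)
  have hfd : ∀ x : Int, PySem.Int.floordiv x 2 = x / 2 := fun x =>
    PySem.Int.floordiv_eq_ediv_of_pos (by norm_num)
  have H : ∀ (n : Nat) (b : Int), 0 ≤ b → b ≤ bs → (bs - b).toNat = n →
      (((PySem.List.pyRange b bs 1).filter
          (fun c => PySem.Int.mod (r + c) 2 == 1)).length : Int)
      = PySem.Int.floordiv (bs + 1 - PySem.Int.mod (r + 1) 2) 2 -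
        PySem.Int.floordiv (b + 1 - PySem.Int.mod (r + 1) 2) 2 := by
    intro n
    induction n with
    | zero =>
      intro b hb hbs hn
      have : b = bs := by omega
      subst this
      rw [PySem.List.pyRange_one_eq_nil le_rfl]
      simp
    | succ n ih =>
      intro b hb hbs hn
      have hblt : b < bs := by omega
      rw [PySem.List.pyRange_one_cons hblt, List.filter_cons]
      have ih' := ih (b + 1) (by omega) (by omega) (by omega)
      by_cases hq : PySem.Int.mod (r + b) 2 = 1
      · rw [if_pos (by simpa using hq), List.length_cons]
        push_cast
        rw [ih']
        rw [hmod] at hq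
        simp only [hfd, hmod]
        omega
      · rw [if_neg (by simpa using hq), ih']
        rw [hmod] at hq
        simp only [hfd, hmod]
        omega
  exact fun b hb hbs => H (bs - b).toNat b hb hbs rfl

-- the per-row block length in terms of the closed-form cumulative count
theorem pv_blk_len_id (a bs : Int) :
    PySem.Int.floordiv (bs + 1 - PySem.Int.mod (a + 1) 2) 2 -
      PySem.Int.floordiv (0 + 1 - PySem.Int.mod (a + 1) 2) 2
    = PySem.Int.floordiv ((a + 1) * bs) 2 - PySem.Int.floordiv (a * bs) 2 := by
  have hmod : ∀ x : Int, PySem.Int.mod x 2 = x % 2 := fun x =>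
    PySem.Int.mod_eq_emod_of_pos (by norm_num)
  have hfd : ∀ x : Int, PySem.Int.floordiv x 2 = x / 2 := fun x =>
    PySem.Int.floordiv_eq_ediv_of_pos (by norm_num)
  simp only [hmod, hfd]
  have hx : (a + 1) * bs = a * bs + bs := by ring
  have hpar : (a * bs) % 2 = ((a % 2) * (bs % 2)) % 2 := Int.mul_emod a bs 2
  have ha2 : a % 2 = 0 ∨ a % 2 = 1 := Int.emod_two_eq_zero_or_one a
  have hb2 : bs % 2 = 0 ∨ bs % 2 = 1 := Int.emod_two_eq_zero_or_one bs
  rcases ha2 with h | h <;> rcases hb2 with h' | h' <;>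
    rw [h, h'] at hpar <;> norm_num at hpar <;> omega

theorem pv_row_index? (bs fr fc : Int) : ∀ a : Int, 0 ≤ a →
    Option.map (fun n : Nat => (n : Int))
      (PySem.List.index? ((PySem.List.pyRange a bs 1).flatMap (fun row =>
        ((PySem.List.pyRange 0 bs 1).filter
          (fun c => PySem.Int.mod (row + c) 2 == 1)).map (fun c => (row, c)))) (fr, fc))
    = if a ≤ fr ∧ fr < bs ∧ 0 ≤ fc ∧ fc < bs ∧ PySem.Int.mod (fr + fc) 2 = 1 then
        some (PySem.Int.floordiv (fr * bs) 2 + PySem.Int.floordiv fc 2 -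
              PySem.Int.floordiv (a * bs) 2)
      else none := by
  have H : ∀ (n : Nat) (a : Int), 0 ≤ a → (bs - a).toNat = n →
      Option.map (fun n : Nat => (n : Int))
        (PySem.List.index? ((PySem.List.pyRange a bs 1).flatMap (fun row =>
          ((PySem.List.pyRange 0 bs 1).filter
            (fun c => PySem.Int.mod (row + c) 2 == 1)).map (fun c => (row, c)))) (fr, fc))
      = if a ≤ fr ∧ fr < bs ∧ 0 ≤ fc ∧ fc < bs ∧ PySem.Int.mod (fr + fc) 2 = 1 then
          some (PySem.Int.floordiv (fr * bs) 2 + PySem.Int.floordiv fc 2 -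
                PySem.Int.floordiv (a * bs) 2)
        else none := by
    intro n
    induction n with
    | zero =>
      intro a ha hn
      rw [show PySem.List.pyRange a bs 1 = [] from PySem.List.pyRange_one_eq_nil (by omega)]
      rw [if_neg (by intro h; exact absurd h.1 (by omega))]
      simp [PySem.List.index?_eq_idxOf?]
    | succ n ih =>
      intro a ha hn
      have halt : a < bs := by omega
      rw [show PySem.List.pyRange a bs 1 = a :: PySem.List.pyRange (a+1) bs 1 from PySem.List.pyRange_one_cons halt, List.flatMap_cons]
      by_cases hfr : fr = a
      · subst hfr
        have hcol := pv_col_index? fr bs fc 0 le_rfl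
        by_cases hc : 0 ≤ fc ∧ fc < bs ∧ PySem.Int.mod (fr + fc) 2 = 1
        · rw [if_pos hc] at hcol
          have hfcmem : fc ∈ (PySem.List.pyRange 0 bs 1).filter
              (fun c => PySem.Int.mod (fr + c) 2 == 1) := by
            rw [← PySem.List.index?_isSome_iff]
            rcases hidx : PySem.List.index? ((PySem.List.pyRange 0 bs 1).filter
                (fun c => PySem.Int.mod (fr + c) 2 == 1)) fc with _ | k
            · rw [hidx] at hcol; simp at hcol
            · rfl
          have hmem : (fr, fc) ∈ ((PySem.List.pyRange 0 bs 1).filter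
              (fun c => PySem.Int.mod (fr + c) 2 == 1)).map (fun c => (fr, c)) :=
            List.mem_map.mpr ⟨fc, hfcmem, rfl⟩
          rw [PySem.List.index?_append_of_mem _ hmem]
          have hinj : Function.Injective (fun c : Int => (fr, c)) := by
            intro x y hxy; simpa using hxy
          rw [pv_index?_map hinj, hcol, if_pos ⟨le_rfl, halt, hc⟩]
          have hm2 : PySem.Int.mod (fr + 1) 2 = 0 ∨ PySem.Int.mod (fr + 1) 2 = 1 :=
            PySem.Int.mod_two_eq _
          have hfd : ∀ x : Int, PySem.Int.floordiv x 2 = x / 2 := fun x =>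
            PySem.Int.floordiv_eq_ediv_of_pos (by norm_num)
          simp only [hfd] at *
          congr 1
          omega
        · rw [if_neg hc] at hcol
          have hnone : PySem.List.index? ((PySem.List.pyRange 0 bs 1).filter
              (fun c => PySem.Int.mod (fr + c) 2 == 1)) fc = none := by
            rcases hidx : PySem.List.index? ((PySem.List.pyRange 0 bs 1).filter
                (fun c => PySem.Int.mod (fr + c) 2 == 1)) fc with _ | k
            · rfl
            · rw [hidx] at hcol; simp at hcol
          have hnotmem : (fr, fc) ∉ ((PySem.List.pyRange 0 bs 1).filter
              (fun c => PySem.Int.mod (fr + c) 2 == 1)).map (fun c => (fr, c)) := by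
            intro hm
            rcases List.mem_map.mp hm with ⟨c, hcmem, hce⟩
            have : c = fc := by simpa using hce
            subst this
            exact ((PySem.List.index?_eq_none_iff _ _).mp hnone) hcmem
          have hnotrest : (fr, fc) ∉ (PySem.List.pyRange (fr + 1) bs 1).flatMap
              (fun row => ((PySem.List.pyRange 0 bs 1).filter
                (fun c => PySem.Int.mod (row + c) 2 == 1)).map (fun c => (row, c))) := by
            intro hm
            rcases List.mem_flatMap.mp hm with ⟨row, hrow, hmm⟩
            rcases List.mem_map.mp hmm with ⟨c, _, hce⟩
            have hrowfr : row = fr := by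
              have := congrArg Prod.fst hce; simpa using this
            subst hrowfr
            have := (PySem.List.mem_pyRange_one.mp hrow).1
            omega
          rw [(PySem.List.index?_eq_none_iff _ _).mpr (by
            intro hm
            rcases List.mem_append.mp hm with hm | hm
            · exact hnotmem hm
            · exact hnotrest hm)]
          rw [if_neg (by intro h; exact hc ⟨h.2.2.1, h.2.2.2⟩)]
          rfl
      · have hnotblk : (fr, fc) ∉ ((PySem.List.pyRange 0 bs 1).filter
            (fun c => PySem.Int.mod (a + c) 2 == 1)).map (fun c => (a, c)) := by
          intro hm
          rcases List.mem_map.mp hm with ⟨c, _, hce⟩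
          have := congrArg Prod.fst hce
          simp at this
          exact hfr this.symm
        rw [pv_index?_append_of_not_mem _ hnotblk, Option.map_map]
        have ih' := ih (a + 1) (by omega) (by omega)
        have hcomp : ∀ (X : Option Nat) (L : Nat),
            Option.map ((fun n : Nat => (n : Int)) ∘ (· + L)) X
            = Option.map (fun z : Int => z + (L : Int)) (Option.map (fun n : Nat => (n : Int)) X) := by
          intro X L
          cases X
          · rfl
          · simp
        rw [hcomp, ih']
        have hlen : ((((PySem.List.pyRange 0 bs 1).filter
            (fun c => PySem.Int.mod (a + c) 2 == 1)).map (fun c => (a, c))).length : Int)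
            = PySem.Int.floordiv ((a + 1) * bs) 2 - PySem.Int.floordiv (a * bs) 2 := by
          rw [List.length_map]
          rw [pv_col_length a bs 0 le_rfl (by omega)]
          exact pv_blk_len_id a bs
        by_cases hc : a + 1 ≤ fr ∧ fr < bs ∧ 0 ≤ fc ∧ fc < bs ∧ PySem.Int.mod (fr + fc) 2 = 1
        · rw [if_pos hc, if_pos ⟨by omega, hc.2⟩]
          simp only [Option.map_some]
          rw [hlen]
          congr 1
          ring
        · rw [if_neg hc, if_neg (by
            intro h
            exact hc ⟨by omega, h.2⟩)]
          rfl
  exact fun a ha => H (bs - a).toNat a ha rfl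

-- dr // abs(dr) is the sign of dr
theorem pv_sign (d : Int) (h : d ≠ 0) :
    PySem.Int.floordiv d |d| = if 0 < d then 1 else -1 := by
  rcases lt_or_gt_of_ne h with hneg | hpos
  · rw [if_neg (by omega), abs_of_neg hneg,
      PySem.Int.floordiv_eq_iff_of_pos (by omega)]
    constructor <;> omega
  · rw [if_pos hpos, abs_of_pos hpos,
      PySem.Int.floordiv_eq_iff_of_pos (by omega)]
    constructor <;> omega

-- the direction lookup of A equals the direction arithmetic of B
theorem pv_dir (dr dc k : Int) :
    (match PySem.List.index?
        ([(-1,-1), (-1,1), (1,-1), (1,1), (-2,-2), (-2,2), (2,-2), (2,2)] : List (Int × Int))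
        (dr, dc) with
     | some di => k * 8 + (di : Int)
     | none =>
       match PySem.List.index?
          ([(-1,-1), (-1,1), (1,-1), (1,1), (-2,-2), (-2,2), (2,-2), (2,2)] : List (Int × Int))
          ((if dr ≠ 0 then PySem.Int.floordiv dr |dr| else 0),
           (if dc ≠ 0 then PySem.Int.floordiv dc |dc| else 0)) with
       | some di => k * 8 + (di : Int)
       | none => -1)
    = if dr = 0 ∨ dc = 0 then -1
      else k * 8 + (if |dr| = 2 ∧ |dc| = 2 then
          (if 0 < dr then 2 else 0) + (if 0 < dc then 1 else 0) + 4
        else (if 0 < dr then 2 else 0) + (if 0 < dc then 1 else 0)) := by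
  have hdirs : ∀ x y : Int, (x, y) ∈
      ([(-1,-1), (-1,1), (1,-1), (1,1), (-2,-2), (-2,2), (2,-2), (2,2)] : List (Int × Int)) ↔
      ((x = -1 ∧ y = -1) ∨ (x = -1 ∧ y = 1) ∨ (x = 1 ∧ y = -1) ∨ (x = 1 ∧ y = 1) ∨
       (x = -2 ∧ y = -2) ∨ (x = -2 ∧ y = 2) ∨ (x = 2 ∧ y = -2) ∨ (x = 2 ∧ y = 2)) := by
    intro x y
    simp [Prod.ext_iff]
  have hI0 : List.idxOf? ((-1:Int), (-1:Int)) ([(-1,-1), (-1,1), (1,-1), (1,1), (-2,-2), (-2,2), (2,-2), (2,2)] : List (Int × Int)) = some 0 := by decide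
  have hI1 : List.idxOf? ((-1:Int), (1:Int)) ([(-1,-1), (-1,1), (1,-1), (1,1), (-2,-2), (-2,2), (2,-2), (2,2)] : List (Int × Int)) = some 1 := by decide
  have hI2 : List.idxOf? ((1:Int), (-1:Int)) ([(-1,-1), (-1,1), (1,-1), (1,1), (-2,-2), (-2,2), (2,-2), (2,2)] : List (Int × Int)) = some 2 := by decide
  have hI3 : List.idxOf? ((1:Int), (1:Int)) ([(-1,-1), (-1,1), (1,-1), (1,1), (-2,-2), (-2,2), (2,-2), (2,2)] : List (Int × Int)) = some 3 := by decide
  have hI4 : List.idxOf? ((-2:Int), (-2:Int)) ([(-1,-1), (-1,1), (1,-1), (1,1), (-2,-2), (-2,2), (2,-2), (2,2)] : List (Int × Int)) = some 4 := by decide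
  have hI5 : List.idxOf? ((-2:Int), (2:Int)) ([(-1,-1), (-1,1), (1,-1), (1,1), (-2,-2), (-2,2), (2,-2), (2,2)] : List (Int × Int)) = some 5 := by decide
  have hI6 : List.idxOf? ((2:Int), (-2:Int)) ([(-1,-1), (-1,1), (1,-1), (1,1), (-2,-2), (-2,2), (2,-2), (2,2)] : List (Int × Int)) = some 6 := by decide
  have hI7 : List.idxOf? ((2:Int), (2:Int)) ([(-1,-1), (-1,1), (1,-1), (1,1), (-2,-2), (-2,2), (2,-2), (2,2)] : List (Int × Int)) = some 7 := by decide
  by_cases h0 : dr = 0 ∨ dc = 0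
  · rw [if_pos h0]
    have h1 : PySem.List.index?
        ([(-1,-1), (-1,1), (1,-1), (1,1), (-2,-2), (-2,2), (2,-2), (2,2)] : List (Int × Int))
        (dr, dc) = none := by
      rw [PySem.List.index?_eq_none_iff]
      intro hm
      rcases (hdirs dr dc).mp hm with h|h|h|h|h|h|h|h <;> omega
    rw [h1]
    have h2 : PySem.List.index?
        ([(-1,-1), (-1,1), (1,-1), (1,1), (-2,-2), (-2,2), (2,-2), (2,2)] : List (Int × Int))
        ((if dr ≠ 0 then PySem.Int.floordiv dr |dr| else 0),
         (if dc ≠ 0 then PySem.Int.floordiv dc |dc| else 0)) = none := by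
      rw [PySem.List.index?_eq_none_iff]
      intro hm
      rcases h0 with h0 | h0
      · rw [show (if dr ≠ 0 then PySem.Int.floordiv dr |dr| else 0) = 0 from
          if_neg (by simpa using h0)] at hm
        rcases (hdirs _ _).mp hm with h|h|h|h|h|h|h|h <;> omega
      · rw [show (if dc ≠ 0 then PySem.Int.floordiv dc |dc| else 0) = 0 from
          if_neg (by simpa using h0)] at hm
        rcases (hdirs _ _).mp hm with h|h|h|h|h|h|h|h <;> omega
    rw [h2]
  · push_neg at h0
    rw [if_neg (not_or.mpr ⟨h0.1, h0.2⟩)]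
    by_cases hm : (dr, dc) ∈
        ([(-1,-1), (-1,1), (1,-1), (1,1), (-2,-2), (-2,2), (2,-2), (2,2)] : List (Int × Int))
    · rcases (hdirs dr dc).mp hm with ⟨h1,h2⟩|⟨h1,h2⟩|⟨h1,h2⟩|⟨h1,h2⟩|⟨h1,h2⟩|⟨h1,h2⟩|⟨h1,h2⟩|⟨h1,h2⟩ <;>
        subst h1 <;> subst h2 <;>
        simp only [PySem.List.index?_eq_idxOf?, hI0, hI1, hI2, hI3, hI4, hI5, hI6, hI7] <;>
        norm_num
    · have hnone1 : PySem.List.index?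
          ([(-1,-1), (-1,1), (1,-1), (1,1), (-2,-2), (-2,2), (2,-2), (2,2)] : List (Int × Int))
          (dr, dc) = none := by
        rw [PySem.List.index?_eq_none_iff]; exact hm
      have hnot2 : ¬(|dr| = 2 ∧ |dc| = 2) := fun hab => hm ((hdirs dr dc).mpr (by
        rcases (abs_eq (by norm_num : (0:Int) ≤ 2)).mp hab.1 with h|h <;>
          rcases (abs_eq (by norm_num : (0:Int) ≤ 2)).mp hab.2 with h'|h' <;> omega))
      rw [hnone1, if_pos h0.1, if_pos h0.2, pv_sign dr h0.1, pv_sign dc h0.2]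
      by_cases hdr : 0 < dr <;> by_cases hdc : 0 < dc
      · rw [if_pos hdr, if_pos hdc, if_neg hnot2, if_pos hdr, if_pos hdc]
        simp only [PySem.List.index?_eq_idxOf?, hI3]
        norm_num
      · rw [if_pos hdr, if_neg hdc, if_neg hnot2, if_pos hdr, if_neg hdc]
        simp only [PySem.List.index?_eq_idxOf?, hI2]
        norm_num
      · rw [if_neg hdr, if_pos hdc, if_neg hnot2, if_neg hdr, if_pos hdc]
        simp only [PySem.List.index?_eq_idxOf?, hI1]
        norm_num
      · rw [if_neg hdr, if_neg hdc, if_neg hnot2, if_neg hdr, if_neg hdc]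
        simp only [PySem.List.index?_eq_idxOf?, hI0]
        norm_num

-- the two ports agree on every input
theorem pv_encode_eq (fr fc tr tc bs : Int) :
    encode_move fr fc tr tc bs = encode_move_alt fr fc tr tc bs := by
  unfold encode_move encode_move_alt
  have hplay : ((PySem.List.pyRange 0 bs 1).foldl (fun acc row =>
      (PySem.List.pyRange 0 bs 1).foldl (fun acc2 col =>
        if PySem.Int.mod (row + col) 2 == 1 then acc2 ++ [(row, col)] else acc2) acc)
      ([] : List (Int × Int)))
      = (PySem.List.pyRange 0 bs 1).flatMap (fun row =>
          ((PySem.List.pyRange 0 bs 1).filter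
            (fun c => PySem.Int.mod (row + c) 2 == 1)).map (fun c => (row, c))) := by
    simp only [PySem.List.foldl_append_if]
    rw [PySem.List.foldl_append_eq_flatMap]
    simp
  have hrow := pv_row_index? bs fr fc 0 le_rfl
  rw [show (0 : Int) * bs = 0 from by ring] at hrow
  rw [show PySem.Int.floordiv 0 2 = 0 from by decide] at hrow
  simp only [sub_zero] at hrow
  by_cases hin : 0 ≤ fr ∧ fr < bs ∧ 0 ≤ fc ∧ fc < bs ∧ PySem.Int.mod (fr + fc) 2 = 1
  · rw [if_pos hin] at hrow
    rcases hix : PySem.List.index? ((PySem.List.pyRange 0 bs 1).flatMap (fun row =>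
        ((PySem.List.pyRange 0 bs 1).filter
          (fun c => PySem.Int.mod (row + c) 2 == 1)).map (fun c => (row, c)))) (fr, fc)
      with _ | n
    · rw [hix] at hrow; simp at hrow
    · rw [hix] at hrow
      simp only [Option.map_some, Option.some.injEq] at hrow
      simp only [hplay, hix, if_pos hin]
      rw [← hrow]
      exact pv_dir (tr - fr) (tc - fc) (n : Int)
  · rw [if_neg hin] at hrow
    have hnone : PySem.List.index? ((PySem.List.pyRange 0 bs 1).flatMap (fun row =>
        ((PySem.List.pyRange 0 bs 1).filter
          (fun c => PySem.Int.mod (row + c) 2 == 1)).map (fun c => (row, c)))) (fr, fc) = none := by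
      rcases hix : PySem.List.index? _ (fr, fc) with _ | n
      · rfl
      · rw [hix] at hrow; simp at hrow
    simp only [hplay, hnone, if_neg hin]

-- ===== VERDICT (by name: the statement is the Claim_ definition above) =====
theorem encode_move_spec : Claim_equal_encode_move := by
  intro fr fc tr tc bs _
  unfold Spec_encode_move
  exact pv_encode_eq fr fc tr tc bs
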